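/-
  THE LANGUAGE jsmn ACCEPTS, PART 4b: the strict build's token array and the machine of Json/Jsmn/AcceptLangStrict.lean, step by step.
  `Rel ts tn sup ns`: the `Node`s `ns` are what the first `tn` tokens of the array `ts` look like to the strict build's checks, and
  `sup` (toksuper) and the parent links are in range. One lemma per case of jsmn_parse's `switch`: the model's step on the array is the
  machine's step on the nodes.
-/
import Json.Jsmn.AcceptLangStrict
import Json.Jsmn.AcceptLangTok
set_option linter.unusedSimpArgs false

namespace Jsmn.AcceptLang
open Jsmn

/-- What the strict build's checks see of a token. -/
def nodeOf (t : Token) : Node := ⟨t.type, t.isOpen, t.parent, t.size != 0⟩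

/-- The nodes `ns` describe the first `tn` tokens of `ts`; `sup` and the parent links are in range, the sizes are small. -/
structure Rel (ts : Tokens) (tn : Nat) (sup : Int) (ns : List Node) : Prop where
  len : ns.length = tn
  node : ∀ i, i < tn → ns.getD i default = nodeOf (ts.getD i default)
  sup : -1 ≤ sup ∧ sup < tn
  link : ∀ i, i < tn → -1 ≤ (ts.getD i default).parent ∧ (ts.getD i default).parent < i
  size : ∀ i, i < tn → 0 ≤ (ts.getD i default).size ∧ (ts.getD i default).size ≤ tn

theorem Rel.nodeAt {ts : Tokens} {tn : Nat} {sup : Int} {ns : List Node} (h : Rel ts tn sup ns) {i : Int} (h0 : 0 ≤ i) (h1 : i < tn) :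
    nodeAt ns i = nodeOf (tokAt ts i) := by
  rw [AcceptLang.nodeAt, if_neg (by omega), tokAt_nonneg h0]
  exact h.node i.toNat (by omega)

/-- Changing `toksuper` only. -/
theorem Rel.setSup {ts : Tokens} {tn : Nat} {sup : Int} {ns : List Node} (h : Rel ts tn sup ns) (sup' : Int) (h' : -1 ≤ sup' ∧ sup' < tn) :
    Rel ts tn sup' ns := ⟨h.len, h.node, h', h.link, h.size⟩

/-- `jsmn_alloc_token` of the strict build when there is room. -/
theorem allocToken_strict {p : Parser} {ts : Tokens} {n : Nat} (hroom : p.toknext < n) (h31 : p.toknext < 2147483648) :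
    allocToken .strictLinks p ts n = some (p.toknext, { p with toknext := p.toknext + 1 },
      ts.set p.toknext { ts.getD p.toknext default with start := -1, «end» := -1, size := 0, parent := -1 }) := by
  have hu : u32 ((p.toknext : Int) + 1) = p.toknext + 1 := u32_succ (by omega)
  simp [allocToken, Nat.not_le.mpr hroom, hu, Config.strictLinks]

/-- The nodes after `countInto`: node `sup` has a child, the others are unchanged. -/
theorem getD_countInto (ns : List Node) (sup : Int) (i : Nat) :
    (countInto ns sup).getD i default =
      if sup = (i : Int) ∧ i < ns.length then { ns.getD i default with hasChild := true } else ns.getD i default := by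
  unfold countInto
  by_cases hs : sup = -1
  · have : ¬ ((-1 : Int) = (i : Int) ∧ i < ns.length) := by omega
    simp [hs, this]
  · simp only [bne_iff_ne, ne_eq, hs, not_false_eq_true, if_true, nodeUpd]
    by_cases hneg : sup < 0
    · have : ¬ (sup = (i : Int) ∧ i < ns.length) := by omega
      simp [hneg, this]
    · simp only [hneg, if_false, nodeAt]
      rw [List.getD_eq_getElem?_getD, List.getD_eq_getElem?_getD, List.getElem?_set]
      by_cases h1 : sup.toNat = i
      · have hsup : sup = (i : Int) := by omega
        by_cases h2 : i < ns.length
        · have hc : sup = (i : Int) ∧ i < ns.length := ⟨hsup, h2⟩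
          simp [hc, h1, h2, List.getD_eq_getElem?_getD]
        · have hc : ¬ (sup = (i : Int) ∧ i < ns.length) := fun h => h2 h.2
          simp [hc, h1, h2]
      · have : ¬ (sup = (i : Int) ∧ i < ns.length) := by omega
        simp [h1, this]

theorem length_countInto (ns : List Node) (sup : Int) : (countInto ns sup).length = ns.length := by
  unfold countInto nodeUpd; split
  · split <;> simp
  · rfl


theorem getD_append_left {α : Type} (l₁ l₂ : List α) (d : α) (i : Nat) (h : i < l₁.length) : (l₁ ++ l₂).getD i d = l₁.getD i d := by
  rw [List.getD_eq_getElem?_getD, List.getD_eq_getElem?_getD, List.getElem?_append_left h]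
theorem getD_append_last {α : Type} (l₁ : List α) (x d : α) : (l₁ ++ [x]).getD l₁.length d = x := by
  rw [List.getD_eq_getElem?_getD, List.getElem?_append_right (Nat.le_refl _)]; simp

/-- `tokens[i].size++`. -/
def bumpTok (t : Token) : Token := { t with size := i32 (t.size + 1) }

theorem getD_tokUpd (ts : Tokens) (i : Int) (f : Token → Token) (j : Nat) :
    (tokUpd ts i f).getD j default = if i = (j : Int) ∧ j < ts.length then f (ts.getD j default) else ts.getD j default := by
  unfold tokUpd
  by_cases hneg : i < 0
  · have : ¬ (i = (j : Int) ∧ j < ts.length) := by omega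
    simp [hneg, this]
  · rw [if_neg hneg, getD_set, tokAt_nonneg (by omega)]
    by_cases h1 : i.toNat = j
    · have hi : i = (j : Int) := by omega
      by_cases h2 : j < ts.length
      · have hc : i = (j : Int) ∧ j < ts.length := ⟨hi, h2⟩
        have hc' : i.toNat = j ∧ i.toNat < ts.length := ⟨h1, by omega⟩
        rw [if_pos hc, if_pos hc', h1]
      · have hc : ¬ (i = (j : Int) ∧ j < ts.length) := fun h => h2 h.2
        have hc' : ¬ (i.toNat = j ∧ i.toNat < ts.length) := fun h => h2 (by omega)
        rw [if_neg hc, if_neg hc']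
    · have hc : ¬ (i = (j : Int) ∧ j < ts.length) := by omega
      have hc' : ¬ (i.toNat = j ∧ i.toNat < ts.length) := fun h => h1 h.1
      rw [if_neg hc, if_neg hc']

/-- **One more token.** The array `ts'` is `ts` with the superior token's size bumped (if there is one) and a new token `tn` whose node
is `nd`, with parent `sup` and size 0: the nodes are `countInto ns sup ++ [nd]`. -/
theorem Rel.append {ts ts' : Tokens} {tn : Nat} {sup : Int} {ns : List Node} (h : Rel ts tn sup ns) (nd : Node) (sup' : Int)
    (hlen : tn < ts.length)
    (hlow : ∀ i, i < tn → ts'.getD i default = if sup = (i : Int) then bumpTok (ts.getD i default) else ts.getD i default)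
    (hnew : nodeOf (ts'.getD tn default) = nd) (hpar : nd.parent = sup) (hsz : (ts'.getD tn default).size = 0)
    (hsup' : -1 ≤ sup' ∧ sup' < tn + 1) (h31 : tn + 1 < 2147483648) :
    Rel ts' (tn + 1) sup' (countInto ns sup ++ [nd]) := by
  have hcl : (countInto ns sup).length = tn := by rw [length_countInto, h.len]
  refine ⟨by simp [hcl], ?_, by omega, ?_, ?_⟩
  · intro i hi
    by_cases hit : i < tn
    · rw [getD_append_left _ _ _ _ (by omega), getD_countInto, hlow i hit, h.len]
      have hsz := h.size i hit
      by_cases hs : sup = (i : Int)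
      · rw [if_pos hs, if_pos ⟨hs, hit⟩, h.node i hit]
        have e : i32 ((ts.getD i default).size + 1) = (ts.getD i default).size + 1 := by unfold i32; omega
        have hne : (i32 ((ts.getD i default).size + 1) != 0) = true := by
          rw [e, bne_iff_ne]; omega
        simp only [nodeOf, bumpTok, Token.isOpen, hne]
      · rw [if_neg hs, if_neg (fun hh => hs hh.1), h.node i hit]
    · have : i = tn := by omega
      subst this
      rw [← hcl, getD_append_last, hcl, hnew]
  · intro i hi
    by_cases hit : i < tn
    · have hl := h.link i hit
      rw [hlow i hit]
      split
      · simpa [bumpTok] using hl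
      · exact hl
    · have : i = tn := by omega
      subst this
      have : (ts'.getD i default).parent = sup := by rw [← hpar, ← hnew]; rfl
      rw [this]; exact ⟨h.sup.1, h.sup.2⟩
  · intro i hi
    by_cases hit : i < tn
    · have hsz := h.size i hit
      rw [hlow i hit]
      split
      · have : i32 ((ts.getD i default).size + 1) = (ts.getD i default).size + 1 := by unfold i32; omega
        simp only [bumpTok, this]; omega
      · omega
    · have : i = tn := by omega
      subst this
      rw [hsz]; omega

/-! ### Strings and primitives -/

/-- `jsmn_alloc_token`, `jsmn_fill_token`, `token->parent = toksuper` on token `tn`. -/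
def fillAtS (ts : Tokens) (tn : Nat) (type : Nat) (a b : Int) (sup : Int) : Tokens :=
  let ts1 := ts.set tn { ts.getD tn default with start := -1, «end» := -1, size := 0, parent := -1 }
  let ts2 := ts1.set tn (fillToken (ts1.getD tn default) type a b)
  ts2.set tn { ts2.getD tn default with parent := sup }

theorem getD_fillAtS_ne (ts : Tokens) (tn : Nat) (type : Nat) (a b sup : Int) (i : Nat) (h : i ≠ tn) :
    (fillAtS ts tn type a b sup).getD i default = ts.getD i default := by
  simp only [fillAtS]
  rw [getD_set_ne _ (Ne.symm h), getD_set_ne _ (Ne.symm h), getD_set_ne _ (Ne.symm h)]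

theorem getD_fillAtS_eq (ts : Tokens) (tn : Nat) (type : Nat) (a b sup : Int) (h : tn < ts.length) :
    (fillAtS ts tn type a b sup).getD tn default = ⟨type, a, b, 0, sup⟩ := by
  simp only [fillAtS]
  rw [getD_set_eq _ (by simpa using h), getD_set_eq _ (by simpa using h)]
  rfl

theorem length_fillAtS (ts : Tokens) (tn : Nat) (type : Nat) (a b sup : Int) : (fillAtS ts tn type a b sup).length = ts.length := by
  simp [fillAtS]

/-- A string or primitive token is made in the strict build: the machine's `str` / `prim` step. -/
theorem rel_after_fill {ts : Tokens} {tn : Nat} {sup : Int} {ns : List Node} (h : Rel ts tn sup ns) (q : Nat) (type : Nat) (a b : Int)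
    (hlen : tn < ts.length) (hb : b ≠ -1) (h31 : tn + 1 < 2147483648) :
    ∃ ts', bumpSuper ⟨q, tn + 1, sup⟩ (some (fillAtS ts tn type a b sup)) = some ts' ∧ ts'.length = ts.length ∧
      Rel ts' (tn + 1) sup (countInto ns sup ++ [⟨type, false, sup, false⟩]) := by
  have hs := h.sup
  simp only [bumpSuper]
  by_cases hsup : sup = -1
  · have hne : ¬ (sup != -1) = true := by simp [hsup]
    refine ⟨fillAtS ts tn type a b sup, by rw [if_neg hne], by rw [length_fillAtS], ?_⟩
    refine h.append _ sup hlen ?_ ?_ rfl ?_ (by omega) h31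
    · intro i hi
      rw [getD_fillAtS_ne _ _ _ _ _ _ _ (by omega), if_neg (by omega)]
    · rw [getD_fillAtS_eq _ _ _ _ _ _ hlen]; simp [nodeOf, Token.isOpen, hb]
    · rw [getD_fillAtS_eq _ _ _ _ _ _ hlen]
  · have hne : (sup != -1) = true := by simpa using hsup
    refine ⟨tokUpd (fillAtS ts tn type a b sup) sup fun t => { t with size := i32 (t.size + 1) }, by rw [if_pos hne],
      by rw [length_tokUpd, length_fillAtS], ?_⟩
    refine h.append _ sup hlen ?_ ?_ rfl ?_ (by omega) h31
    · intro i hi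
      rw [getD_tokUpd, length_fillAtS, getD_fillAtS_ne _ _ _ _ _ _ _ (by omega)]
      by_cases hc : sup = (i : Int)
      · rw [if_pos ⟨hc, by omega⟩, if_pos hc]; rfl
      · rw [if_neg (fun hh => hc hh.1), if_neg hc]
    · rw [getD_tokUpd, if_neg (by omega), getD_fillAtS_eq _ _ _ _ _ _ hlen]; simp [nodeOf, Token.isOpen, hb]
    · rw [getD_tokUpd, if_neg (by omega), getD_fillAtS_eq _ _ _ _ _ _ hlen]

/-- jsmn_parse_string of the strict build when the closing quote is found at `q` and there is room. -/
theorem parseString_quote_strict {js : List UInt8} {fuel pos tn n q : Nat} {sup : Int} {ts : Tokens}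
    (hr : strScan js fuel (pos + 1) = some (.quote q)) (hpos : pos + 1 < 4294967296) (hroom : tn < n) (h31 : tn < 2147483648) :
    parseString .strictLinks js fuel ⟨pos, tn, sup⟩ (some ts) n =
      some (0, ⟨q, tn + 1, sup⟩, some (fillAtS ts tn JSMN_STRING (i32 (i32 pos + 1)) (i32 q) sup)) := by
  have ha := allocToken_strict (p := ⟨q, tn, sup⟩) (ts := ts) (n := n) hroom h31
  have hpl : Config.strictLinks.parentLinks = true := rfl
  simp only [parseString, u32_succ hpos, hr, ha, hpl, if_true]
  rfl

/-- jsmn_parse_primitive of the strict build when the primitive ends at the stop character at `q` and there is room. -/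
theorem parsePrimitive_found_strict {js : List UInt8} {fuel pos tn n q : Nat} {sup : Int} {ts : Tokens}
    (hr : primScan .strictLinks js fuel pos = some (.found q)) (hroom : tn < n) (h31 : tn < 2147483648) :
    parsePrimitive .strictLinks js fuel ⟨pos, tn, sup⟩ (some ts) n =
      some (0, ⟨u32 ((q : Int) - 1), tn + 1, sup⟩, some (fillAtS ts tn JSMN_PRIMITIVE (i32 pos) (i32 q) sup)) := by
  have ha := allocToken_strict (p := ⟨q, tn, sup⟩) (ts := ts) (n := n) hroom h31
  have hpl : Config.strictLinks.parentLinks = true := rfl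
  simp only [parsePrimitive, hr, ha, hpl, if_true]
  rfl

/-! ### `{` and `[` -/

/-- `case '{': case '[':` of the strict build when there is room: the machine's step (S1: not below an object). -/
theorem openBracket_strict {ts : Tokens} {n pos tn : Nat} {sup : Int} {ns : List Node} (cnt : Int) (k : Kind) (c : UInt8)
    (hc : c = 0x7b ∧ k = .obj ∨ c = 0x5b ∧ k = .arr) (h : Rel ts tn sup ns) (hlen : ts.length = n) (hroom : tn < n)
    (h31 : tn + 1 < 2147483648) (hpos : pos < 2147483648) :
    match strictStep ns sup k.openItem with
    | none => ∃ s', openBracket .strictLinks c n ⟨⟨pos, tn, sup⟩, some ts, cnt⟩ = .ret JSMN_ERROR_INVAL s' ∧ s'.toks.isSome = true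
    | some (ns', sup') => ∃ ts', openBracket .strictLinks c n ⟨⟨pos, tn, sup⟩, some ts, cnt⟩ =
          .next ⟨⟨pos, tn + 1, sup'⟩, some ts', i32 (cnt + 1)⟩ ∧ ts'.length = n ∧ Rel ts' (tn + 1) sup' ns' := by
  have ha := allocToken_strict (p := ⟨pos, tn, sup⟩) (ts := ts) (n := n) hroom (by simp; omega)
  generalize hts1 : ts.set tn { ts.getD tn default with start := -1, «end» := -1, size := 0, parent := -1 } = ts1 at ha
  have hl1 : ts1.length = n := by rw [← hts1]; simpa using hlen
  have hlow1 : ∀ i, i ≠ tn → ts1.getD i default = ts.getD i default := by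
    intro i hi; rw [← hts1, getD_set_ne _ (Ne.symm hi)]
  have htn1 : ts1.getD tn default = { ts.getD tn default with start := -1, «end» := -1, size := 0, parent := -1 } := by
    rw [← hts1, getD_set_eq _ (by omega)]
  have hip : i32 (pos : Int) = pos := by unfold i32; omega
  have hit : i32 (((tn + 1 : Nat) : Int) - 1) = (tn : Int) := by unfold i32; omega
  have hty : (if c == 0x7b then JSMN_OBJECT else JSMN_ARRAY) = k.type := by
    rcases hc with ⟨h1, h2⟩ | ⟨h1, h2⟩ <;> subst h1 <;> subst h2 <;> simp [Kind.type]
  have hstep : strictStep ns sup k.openItem =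
      if sup != -1 && (nodeAt ns sup).type == JSMN_OBJECT then none
      else some (countInto ns sup ++ [⟨k.type, true, sup, false⟩], (ns.length : Int)) := by
    cases k <;> rfl
  have hst : Config.strictLinks.strict = true := rfl
  have hpl : Config.strictLinks.parentLinks = true := rfl
  have hs := h.sup
  rw [hstep]
  simp only [openBracket, ha, hty, hip, hst, hpl, Bool.true_and, if_true, hit]
  by_cases hsup : sup = -1
  · have e1 : ¬ (sup != -1) = true := by simp [hsup]
    have e2 : ¬ (sup != -1 && (nodeAt ns sup).type == JSMN_OBJECT) = true := by simp [hsup]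
    rw [if_neg e1, if_neg e2]
    refine ⟨_, by rw [h.len], by simpa using hl1, ?_⟩
    refine h.append _ _ (by omega) ?_ ?_ rfl ?_ (by rw [h.len]; omega) h31
    · intro i hi
      rw [getD_set_ne _ (by omega), hlow1 i (by omega), if_neg (by omega)]
    · rw [getD_set_eq _ (by omega), htn1]; simp [nodeOf, Token.isOpen, hsup]
    · rw [getD_set_eq _ (by omega), htn1]
  · have e1 : (sup != -1) = true := by simpa using hsup
    have hnode : (nodeAt ns sup).type = (tokAt ts1 sup).type := by
      rw [h.nodeAt (by omega) hs.2, tokAt_nonneg (by omega), tokAt_nonneg (by omega), hlow1 _ (by omega)]; rfl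
    rw [if_pos e1]
    by_cases hobj : (tokAt ts1 sup).type = JSMN_OBJECT
    · have e2 : (sup != -1 && (nodeAt ns sup).type == JSMN_OBJECT) = true := by simp [e1, hnode, hobj]
      have e3 : ((tokAt ts1 sup).type == JSMN_OBJECT) = true := by simp [hobj]
      rw [if_pos e2, if_pos e3]
      exact ⟨_, rfl, rfl⟩
    · have e2 : ¬ (sup != -1 && (nodeAt ns sup).type == JSMN_OBJECT) = true := by simp [hnode, hobj]
      have e3 : ¬ ((tokAt ts1 sup).type == JSMN_OBJECT) = true := by simp [hobj]
      rw [if_neg e2, if_neg e3]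
      refine ⟨_, by rw [h.len], by simp [length_tokUpd, hl1], ?_⟩
      refine h.append _ _ (by omega) ?_ ?_ rfl ?_ (by rw [h.len]; omega) h31
      · intro i hi
        rw [getD_set_ne _ (by omega), getD_set_ne _ (by omega), getD_tokUpd, hl1, hlow1 i (by omega)]
        by_cases hcc : sup = (i : Int)
        · rw [if_pos ⟨hcc, by omega⟩, if_pos hcc]; rfl
        · rw [if_neg (fun hh => hcc hh.1), if_neg hcc]
      · rw [getD_set_eq _ (by simp [length_tokUpd, hl1]; omega), getD_set_eq _ (by simp [length_tokUpd, hl1]; omega),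
          getD_tokUpd, if_neg (by omega), htn1]
        simp [nodeOf, Token.isOpen]
      · rw [getD_set_eq _ (by simp [length_tokUpd, hl1]; omega), getD_set_eq _ (by simp [length_tokUpd, hl1]; omega),
          getD_tokUpd, if_neg (by omega), htn1]

/-! ### `}` and `]` -/

theorem getD_nodeUpd (ns : List Node) (i : Int) (f : Node → Node) (j : Nat) :
    (nodeUpd ns i f).getD j default = if i = (j : Int) ∧ j < ns.length then f (ns.getD j default) else ns.getD j default := by
  unfold nodeUpd
  by_cases hneg : i < 0
  · have : ¬ (i = (j : Int) ∧ j < ns.length) := by omega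
    simp [hneg, this]
  · rw [if_neg hneg, AcceptLang.nodeAt, if_neg hneg, List.getD_eq_getElem?_getD, List.getElem?_set]
    by_cases h1 : i.toNat = j
    · have hi : i = (j : Int) := by omega
      by_cases h2 : j < ns.length
      · have hc : i = (j : Int) ∧ j < ns.length := ⟨hi, h2⟩
        rw [if_pos hc, if_pos h1, if_pos (by omega), h1]; rfl
      · have hc : ¬ (i = (j : Int) ∧ j < ns.length) := fun h => h2 h.2
        rw [if_neg hc, if_pos h1, if_neg (by omega), List.getD_eq_getElem?_getD, List.getElem?_eq_none (by omega)]
    · have hc : ¬ (i = (j : Int) ∧ j < ns.length) := by omega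
      rw [if_neg hc, if_neg h1, List.getD_eq_getElem?_getD]

theorem length_nodeUpd (ns : List Node) (i : Int) (f : Node → Node) : (nodeUpd ns i f).length = ns.length := by
  unfold nodeUpd; split <;> simp

/-- The walk of a closing bracket up the parent links: the model's `closeLinks` is the machine's `closeWalk`. -/
theorem closeLinks_strict {ts : Tokens} {tn : Nat} {sup : Int} {ns : List Node} (pos : Nat) (cnt : Int) (type : Nat)
    (h : Rel ts tn sup ns) (hpos : pos + 1 < 2147483648) : ∀ (fuel : Nat) (idx : Int), 0 ≤ idx → idx < tn → idx + 1 ≤ fuel →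
    match closeWalk type ns sup fuel idx with
    | none => closeLinks type ⟨⟨pos, tn, sup⟩, some ts, cnt⟩ ts fuel idx = some (.ret JSMN_ERROR_INVAL ⟨⟨pos, tn, sup⟩, some ts, cnt⟩)
    | some (ns', sup') => ∃ ts', closeLinks type ⟨⟨pos, tn, sup⟩, some ts, cnt⟩ ts fuel idx =
          some (.next ⟨⟨pos, tn, sup'⟩, some ts', cnt⟩) ∧ ts'.length = ts.length ∧ Rel ts' tn sup' ns' := by
  intro fuel
  induction fuel with
  | zero => intro idx h0 _ h2; omega
  | succ fuel ih =>
    intro idx h0 h1 h2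
    have hnode := h.nodeAt h0 h1
    have hlink := h.link idx.toNat (by omega)
    rw [← tokAt_nonneg h0] at hlink
    have hip : i32 ((pos : Int) + 1) = pos + 1 := by unfold i32; omega
    rw [closeWalk, closeLinks]
    simp only [hnode, nodeOf, hip]
    by_cases hopen : (tokAt ts idx).isOpen = true
    · simp only [hopen, if_true]
      by_cases hty : ((tokAt ts idx).type != type) = true
      · simp only [hty, if_true]
      · simp only [hty, if_false, Bool.false_eq_true]
        refine ⟨_, rfl, by rw [length_tokUpd], ?_⟩
        refine ⟨by rw [length_nodeUpd, h.len], ?_, by omega, ?_, ?_⟩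
        · intro i hi
          rw [getD_nodeUpd, getD_tokUpd, h.len, h.node i hi]
          by_cases hc : idx = (i : Int)
          · have hlt : i < ts.length := by
              by_cases hh : i < ts.length
              · exact hh
              · have hd : tokAt ts idx = default := by
                  rw [tokAt_nonneg h0, List.getD_eq_getElem?_getD, List.getElem?_eq_none (by omega)]; rfl
                rw [hd] at hopen; exact absurd hopen (by decide)
            rw [if_pos ⟨hc, hi⟩, if_pos ⟨hc, hlt⟩]
            simp [nodeOf, Token.isOpen]; omega
          · rw [if_neg (fun hh => hc hh.1), if_neg (fun hh => hc hh.1)]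
        · intro i hi
          rw [getD_tokUpd]; split
          · exact h.link i hi
          · exact h.link i hi
        · intro i hi
          rw [getD_tokUpd]; split
          · exact h.size i hi
          · exact h.size i hi
    · simp only [hopen, if_false, Bool.false_eq_true]
      by_cases hpar : ((tokAt ts idx).parent == -1) = true
      · simp only [hpar, if_true]
        by_cases hbad : ((tokAt ts idx).type != type || sup == -1) = true
        · simp only [hbad, if_true]
        · simp only [hbad, if_false, Bool.false_eq_true]
          exact ⟨ts, rfl, rfl, h⟩
      · simp only [hpar, if_false, Bool.false_eq_true]
        have hne : (tokAt ts idx).parent ≠ -1 := by simpa using hpar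
        exact ih _ (by omega) (by omega) (by omega)

/-- `case '}': case ']':` of the strict build: the machine's step. -/
theorem closeBracket_strict {ts : Tokens} {tn : Nat} {sup : Int} {ns : List Node} (pos : Nat) (cnt : Int) (k : Kind) (c : UInt8)
    (hc : c = 0x7d ∧ k = .obj ∨ c = 0x5d ∧ k = .arr) (h : Rel ts tn sup ns) (hpos : pos + 1 < 2147483648) :
    match strictStep ns sup k.closeItem with
    | none => closeBracket .strictLinks c ⟨⟨pos, tn, sup⟩, some ts, cnt⟩ = some (.ret JSMN_ERROR_INVAL ⟨⟨pos, tn, sup⟩, some ts, cnt⟩)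
    | some (ns', sup') => ∃ ts', closeBracket .strictLinks c ⟨⟨pos, tn, sup⟩, some ts, cnt⟩ =
          some (.next ⟨⟨pos, tn, sup'⟩, some ts', cnt⟩) ∧ ts'.length = ts.length ∧ Rel ts' tn sup' ns' := by
  have hty : (if c == 0x7d then JSMN_OBJECT else JSMN_ARRAY) = k.type := by
    rcases hc with ⟨h1, h2⟩ | ⟨h1, h2⟩ <;> subst h1 <;> subst h2 <;> simp [Kind.type]
  have hstep : strictStep ns sup k.closeItem =
      if ns.length < 1 then none else closeWalk k.type ns sup (ns.length + 1) ((ns.length : Int) - 1) := by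
    cases k <;> rfl
  have hpl : Config.strictLinks.parentLinks = true := rfl
  rw [hstep, h.len]
  simp only [closeBracket, hty, hpl, if_true]
  by_cases h0 : tn < 1
  · simp only [h0, if_true]
  · simp only [h0, if_false]
    have hcast : ((tn - 1 : Nat) : Int) = (tn : Int) - 1 := by omega
    rw [hcast]
    exact closeLinks_strict pos cnt k.type h hpos (tn + 1) ((tn : Int) - 1) (by omega) (by omega) (by omega)

/-- `case ',':` of the strict build (with parent links): the machine's step. -/
theorem comma_strict {ts : Tokens} {tn : Nat} {sup : Int} {ns : List Node} (pos : Nat) (cnt : Int) (h : Rel ts tn sup ns) :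
    ∃ sup', strictStep ns sup .comma = some (ns, sup') ∧
      comma .strictLinks ⟨⟨pos, tn, sup⟩, some ts, cnt⟩ = .next ⟨⟨pos, tn, sup'⟩, some ts, cnt⟩ ∧ Rel ts tn sup' ns := by
  have hs := h.sup
  have hpl : Config.strictLinks.parentLinks = true := rfl
  simp only [strictStep, comma, hpl, if_true]
  by_cases hsup : sup = -1
  · have e : (sup != -1) = false := by simp [hsup]
    simp only [e, Bool.false_and, Bool.false_eq_true, if_false]
    exact ⟨sup, rfl, rfl, h⟩
  · have hnode := h.nodeAt (i := sup) (by omega) hs.2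
    have hlink := h.link sup.toNat (by omega)
    rw [← tokAt_nonneg (by omega)] at hlink
    simp only [hnode, nodeOf]
    split
    · exact ⟨_, rfl, rfl, h.setSup _ (by omega)⟩
    · exact ⟨_, rfl, rfl, h⟩

/-- The test before a primitive in the strict build (S2, S3) is the machine's. -/
theorem forbidden_strict {ts : Tokens} {tn : Nat} {sup : Int} {ns : List Node} (h : Rel ts tn sup ns) :
    (sup != -1 && ((tokAt ts sup).type == JSMN_OBJECT || ((tokAt ts sup).type == JSMN_STRING && (tokAt ts sup).size != 0))) =
    (sup != -1 && ((nodeAt ns sup).type == JSMN_OBJECT || ((nodeAt ns sup).type == JSMN_STRING && (nodeAt ns sup).hasChild))) := by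
  have hs := h.sup
  by_cases hsup : sup = -1
  · simp [hsup]
  · rw [h.nodeAt (i := sup) (by omega) hs.2]; rfl

/-- The check after the main loop: -3 if a token is open. -/
theorem finish_strict {ts : Tokens} {tn : Nat} {sup : Int} {ns : List Node} (pos : Nat) (cnt : Int) (h : Rel ts tn sup ns)
    (h31 : tn < 2147483648) :
    finish ⟨⟨pos, tn, sup⟩, some ts, cnt⟩ = if ns.any (·.isOpen) then JSMN_ERROR_PART else cnt := by
  have hi : i32 ((tn : Int) - 1) = (tn : Int) - 1 := by unfold i32; omega
  simp only [finish, hi]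
  by_cases h0 : tn = 0
  · subst h0
    have : ns = [] := List.eq_nil_of_length_eq_zero h.len
    simp [this]
  · have hn : ((tn : Int) - 1 + 1).toNat = tn := by omega
    rw [if_neg (by omega), hn]
    cases hs : scanOpen ts tn with
    | none =>
      have hno := scanOpen_none hs
      have : ns.any (·.isOpen) = false := by
        rw [List.any_eq_false]
        intro x hx
        obtain ⟨i, hi, rfl⟩ := List.getElem_of_mem hx
        have hi' : i < tn := by rw [← h.len]; exact hi
        have := h.node i hi'
        rw [List.getD_eq_getElem?_getD, List.getElem?_eq_getElem hi] at this
        simp only [Option.getD_some] at this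
        rw [this]; show ¬ (ts.getD i default).isOpen = true
        rw [hno i hi']; exact Bool.false_ne_true
      simp [this]
    | some j =>
      obtain ⟨hj1, hj2, _⟩ := scanOpen_some hs
      have : ns.any (·.isOpen) = true := by
        rw [List.any_eq_true]
        have hjl : j < ns.length := by rw [h.len]; exact hj1
        refine ⟨ns[j], List.getElem_mem hjl, ?_⟩
        have := h.node j hj1
        rw [List.getD_eq_getElem?_getD, List.getElem?_eq_getElem hjl] at this
        simp only [Option.getD_some] at this
        rw [this]; exact hj2
      simp [this]
end Jsmn.AcceptLang
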